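-- pv_equiv track=rewrite | github.com/PdxCodeGuild/class_owl | code/anthony/python/practice2.py | latest_letter
-- ===== SOURCE A (Python) =====
-- def latest_letter(string):
--     working_list = list(string)
--
--     while True:
--         sorted = False
--         for i in range(len(working_list) -1):
--             if working_list[i] > working_list[i+1]:
--                 # Use a temp variable to aid in swaping characters
--                 # temp = working_list[i]
--                 # working_list[i] = working_list[i + 1]
--                 # working_list[i + 1] = temp
--
--                 # Use tuple packing/unpacking to swap characters
--                 working_list[i], working_list[i + 1] = working_list[i + 1], working_list[i]
--                 sorted = True
--         if not sorted:
--             break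
--     return working_list[-1]
-- ===== SOURCE B (Python) =====
-- def latest_letter(string):
--     working_list = list(string)
--     best = working_list[0]
--     for ch in working_list[1:]:
--         if ch > best:
--             best = ch
--     return best
-- ===== Notes on version B (the rewrite author's own statement) =====
-- stated objective: faster
-- what changed: Replaces the repeated bubble-sort passes followed by taking the last element with a single running-maximum scan.
import Mathlib
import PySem

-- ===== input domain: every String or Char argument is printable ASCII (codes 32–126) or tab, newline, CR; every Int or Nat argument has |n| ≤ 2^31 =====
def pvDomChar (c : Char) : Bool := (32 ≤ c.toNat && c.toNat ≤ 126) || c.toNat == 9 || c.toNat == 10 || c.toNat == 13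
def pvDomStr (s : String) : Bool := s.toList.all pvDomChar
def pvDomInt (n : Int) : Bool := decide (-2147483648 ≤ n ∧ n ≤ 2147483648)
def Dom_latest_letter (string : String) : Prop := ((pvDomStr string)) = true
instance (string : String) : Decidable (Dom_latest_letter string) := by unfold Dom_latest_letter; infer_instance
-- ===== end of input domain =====

-- B replaces A's repeated bubble-sort passes (then taking the last element) with a single
-- running-maximum scan; objective: faster (O(n) instead of O(n^2)).

-- ===== PORT A =====
-- one in-place bubble pass over the list, carrying the current element forward;
-- the Bool is Python's `sorted` flag (true iff some swap happened in this pass)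
def bubblePass (a : Char) : List Char → List Char × Bool
  | [] => ([a], false)
  | b :: t =>
    if a > b then
      let r := bubblePass a t
      (b :: r.1, true)
    else
      let r := bubblePass b t
      (a :: r.1, r.2)

-- Python's `while True` loop: repeat passes until a pass makes no swap.
-- `fuel` is an artifact of totality; the loop needs at most `length` passes, and
-- `latest_letter` supplies `length + 1`, so the fuel-0 branch is never reached.
def bubbleLoop (fuel : Nat) (l : List Char) : List Char :=
  match l with
  | [] => []          -- empty list: the pass swaps nothing, the loop breaks at once
  | a :: t =>
    let r := bubblePass a t
    match fuel with
    | 0 => r.1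
    | f + 1 => if r.2 then bubbleLoop f r.1 else r.1

def latest_letter (string : String) : String :=
  let wl := string.toList
  let final := bubbleLoop (wl.length + 1) wl
  match final.getLast? with
  | some c => String.mk [c]     -- working_list[-1]
  | none => ""                  -- Python raises IndexError here; excluded by Pre_

-- ===== PORT B =====
def pvBetter (best ch : Char) : Char := if ch > best then ch else best

def latest_letter_alt (string : String) : String :=
  match string.toList with
  | [] => ""                    -- Python raises IndexError here; excluded by Pre_
  | a :: t => String.mk [t.foldl pvBetter a]

-- ===== PRECONDITION & SPEC =====
-- Pre_ excludes only the empty string, on which both A and B raise IndexError.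
def Pre_latest_letter (string : String) : Prop := string ≠ ""
instance (string : String) : Decidable (Pre_latest_letter string) := by unfold Pre_latest_letter; infer_instance

def pvWitness_latest_letter : String := "cab"

def Spec_latest_letter (string : String) (out : String) : Prop := out = latest_letter_alt string
instance (string : String) (out : String) : Decidable (Spec_latest_letter string out) := by unfold Spec_latest_letter; infer_instance

-- ===== CLAIM (what is proved, stated in full; the proofs are below) =====
def Claim_equal_latest_letter : Prop := ∀ (string : String), Dom_latest_letter string → Pre_latest_letter string → Spec_latest_letter string (latest_letter string)

-- ===== LEMMAS AND PROOFS =====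

theorem pvBetter_eq_max (b c : Char) : pvBetter b c = max b c := by
  unfold pvBetter
  by_cases h : b < c
  · rw [if_pos h]; exact (max_eq_right h.le).symm
  · rw [if_neg h]; exact (max_eq_left (not_lt.mp h)).symm

theorem le_foldl_max (t : List Char) (x : Char) : x ≤ t.foldl max x := by
  induction t generalizing x with
  | nil => exact le_refl x
  | cons b t ih => exact le_trans (le_max_left x b) (ih (max x b))

-- the pass result is nonempty and its head is bounded by the maximum
theorem bubblePass_shape (t : List Char) (a : Char) :
    ∃ c ct, (bubblePass a t).1 = c :: ct ∧ c ≤ t.foldl max a := by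
  induction t generalizing a with
  | nil => exact ⟨a, [], rfl, le_refl a⟩
  | cons b t ih =>
    by_cases h : a > b
    · refine ⟨b, (bubblePass a t).1, by simp [bubblePass, h], ?_⟩
      have : b ≤ t.foldl max a := le_trans h.le (le_foldl_max t a)
      simpa [List.foldl_cons, max_eq_left h.le] using this
    · obtain ⟨c, ct, hc, _⟩ := ih b
      refine ⟨a, (bubblePass b t).1, by simp [bubblePass, h], ?_⟩
      have : a ≤ t.foldl max b := le_trans (not_lt.mp h) (le_foldl_max t b)
      simpa [List.foldl_cons, max_eq_right (not_lt.mp h)] using this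

-- a pass preserves the fold of max
theorem bubblePass_foldl (t : List Char) (a x : Char) :
    ((bubblePass a t).1).foldl max x = max x (t.foldl max a) := by
  induction t generalizing a x with
  | nil => simp [bubblePass]
  | cons b t ih =>
    by_cases h : a > b
    · simp only [bubblePass, if_pos h, List.foldl_cons]
      rw [ih a (max x b)]
      have hb : b ≤ t.foldl max a := le_trans h.le (le_foldl_max t a)
      rw [max_assoc, max_eq_right hb, max_eq_left h.le]
    · simp only [bubblePass, if_neg h, List.foldl_cons]
      rw [ih b (max x a)]
      have ha : a ≤ t.foldl max b := le_trans (not_lt.mp h) (le_foldl_max t b)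
      rw [max_assoc, max_eq_right ha, max_eq_right (not_lt.mp h)]

-- after a pass, the last element is the maximum
theorem bubblePass_getLast (t : List Char) (a : Char) :
    ((bubblePass a t).1).getLast? = some (t.foldl max a) := by
  induction t generalizing a with
  | nil => rfl
  | cons b t ih =>
    by_cases h : a > b
    · obtain ⟨c, ct, hc, _⟩ := bubblePass_shape t a
      simp only [bubblePass, if_pos h, hc, List.getLast?_cons_cons]
      rw [← hc, ih a, List.foldl_cons, max_eq_left h.le]
    · obtain ⟨c, ct, hc, _⟩ := bubblePass_shape t b
      simp only [bubblePass, if_neg h, hc, List.getLast?_cons_cons]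
      rw [← hc, ih b, List.foldl_cons, max_eq_right (not_lt.mp h)]

theorem bubbleLoop_getLast (fuel : Nat) (a : Char) (t : List Char) :
    (bubbleLoop fuel (a :: t)).getLast? = some (t.foldl max a) := by
  induction fuel generalizing a t with
  | zero => simpa [bubbleLoop] using bubblePass_getLast t a
  | succ f ih =>
    simp only [bubbleLoop]
    by_cases hs : (bubblePass a t).2
    · obtain ⟨c, ct, hc, hle⟩ := bubblePass_shape t a
      simp only [hs, if_pos, hc]
      rw [ih c ct]
      have h1 : ct.foldl max c = (c :: ct).foldl max c := by
        simp [List.foldl_cons]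
      rw [h1, ← hc, bubblePass_foldl, max_eq_right hle]
    · simp only [hs]
      simpa using bubblePass_getLast t a

theorem foldl_pvBetter (t : List Char) (a : Char) :
    t.foldl pvBetter a = t.foldl max a := by
  have : pvBetter = max := funext fun b => funext fun c => pvBetter_eq_max b c
  rw [this]

-- ===== VERDICT (by name: the statement is the Claim_ definition above) =====
theorem latest_letter_spec : Claim_equal_latest_letter := by
  intro s _ hpre
  have hne : s.toList ≠ [] := by
    intro h
    exact hpre (String.toList_eq_nil_iff.mp h)
  obtain ⟨a, t, hat⟩ := List.exists_cons_of_ne_nil hne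
  show latest_letter s = latest_letter_alt s
  unfold latest_letter latest_letter_alt
  simp only [hat, bubbleLoop_getLast, foldl_pvBetter]
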